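-- pv_equiv track=rewrite | github.com/s7manth/cs3245-homeworks | Homework #2/A0226581A-A0226618B/index.py | serialize_with_skip_pointers
-- ===== SOURCE A (Python) =====
-- import math
--
-- def serialize_with_skip_pointers(postings_list):
--     length = len(postings_list)
--     interval = int(math.sqrt(length)) #initialising the length of the interval for skip pointer
--
--     counter = 0
--     result = str()
--
--     while counter < length: #to ensure skipping within boundaries
--         result += f" {postings_list[counter]}"
--
--         if counter % interval != 0 or interval <= 1:
--             counter += 1
--             continue
--
--         boundary = counter + interval
--         if boundary < length:
--             documents_to_skip = postings_list[counter + 1 : boundary] #actual skipping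
--             skip_s = " ".join(str(s) for s in documents_to_skip) #string representation of skipping
--
--             result += f" +{len(skip_s) + 2} {skip_s}"
--             counter += len(documents_to_skip) + 1
--             continue
--
--         counter += 1
--
--     return result
-- ===== SOURCE B (Python) =====
-- import math
--
-- def serialize_with_skip_pointers(postings_list):
--     length = len(postings_list)
--     interval = int(math.sqrt(length))
--     tokens = []
--     for i in range(length):
--         tokens.append(str(postings_list[i]))
--         if interval > 1 and i % interval == 0 and i + interval < length:
--             tail = postings_list[i + 1 : i + interval]
--             skip_s = " ".join(str(s) for s in tail)
--             tokens.append("+" + str(len(skip_s) + 2))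
--     return "" if not tokens else " " + " ".join(tokens)
-- ===== Notes on version B (the rewrite author's own statement) =====
-- stated objective: alternative
-- what changed: Replaces the while-loop with counter jumps (which emits each skip block's interior inline via a join and advances the counter past it) by a flat single pass over all indices that builds a token list, inserting a skip-pointer token after every eligible sqrt-spaced position, then joins the tokens once at the end.
import Mathlib
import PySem

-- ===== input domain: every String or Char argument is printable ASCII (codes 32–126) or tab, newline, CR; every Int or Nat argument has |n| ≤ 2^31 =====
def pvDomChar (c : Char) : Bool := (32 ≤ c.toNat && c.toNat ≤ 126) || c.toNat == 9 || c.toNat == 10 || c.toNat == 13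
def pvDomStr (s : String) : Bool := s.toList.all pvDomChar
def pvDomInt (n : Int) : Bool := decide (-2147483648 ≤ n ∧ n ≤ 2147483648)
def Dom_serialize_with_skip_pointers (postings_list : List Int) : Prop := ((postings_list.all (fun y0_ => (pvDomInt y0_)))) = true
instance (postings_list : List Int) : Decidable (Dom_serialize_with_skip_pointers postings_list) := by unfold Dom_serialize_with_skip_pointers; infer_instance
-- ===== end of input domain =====

-- B replaces A's while-loop with counter jumps (skip-block interiors emitted inline via a join)
-- by a flat single pass over all indices building a token list joined once at the end (objective: alternative).

-- ===== PORT A =====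
-- Port notes: the while-loop is swsLoopA; counter is kept as a Nat (Python's counter starts at 0 and only grows);
-- postings_list[counter] is getD counter 0, exact because the loop guard guarantees counter < length;
-- int(math.sqrt(length)) is Nat.sqrt length (exact for every realizable list length);
-- strings are built as List Char (exact: only ASCII digits, '-', '+', ' ' occur) and wrapped once at the end.
def swsLoopA (pl : List Int) (length interval counter : Nat) (result : List Char) : List Char :=
  if _h : counter < length then
    -- result += f" {postings_list[counter]}"
    let result := result ++ (' ' :: PySem.Int.toChars (pl.getD counter 0))
    if counter % interval ≠ 0 ∨ interval ≤ 1 then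
      swsLoopA pl length interval (counter + 1) result
    else
      let boundary := counter + interval
      if boundary < length then
        let documents_to_skip := PySem.List.slice pl (some ((counter + 1 : Nat) : Int)) (some ((boundary : Nat) : Int))
        let skip_s := PySem.Chars.join [' '] (documents_to_skip.map PySem.Int.toChars)
        -- result += f" +{len(skip_s) + 2} {skip_s}"
        let result := result ++ (' ' :: '+' :: PySem.Int.toChars ((skip_s.length : Int) + 2)) ++ (' ' :: skip_s)
        swsLoopA pl length interval (counter + documents_to_skip.length + 1) result
      else
        swsLoopA pl length interval (counter + 1) result
  else result
termination_by length - counter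
decreasing_by all_goals omega

def serialize_with_skip_pointers (postings_list : List Int) : String :=
  String.ofList (swsLoopA postings_list postings_list.length (Nat.sqrt postings_list.length) 0 [])

-- ===== PORT B =====
-- Port notes as for A (Nat.sqrt, getD for the provably in-range postings_list[i], List Char strings).
def swsTokens (pl : List Int) (length interval : Nat) : List (List Char) :=
  (List.range length).foldl
    (fun tokens i =>
      let tokens := tokens ++ [PySem.Int.toChars (pl.getD i 0)]
      if 1 < interval ∧ i % interval = 0 ∧ i + interval < length then
        let tail := PySem.List.slice pl (some ((i + 1 : Nat) : Int)) (some ((i + interval : Nat) : Int))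
        let skip_s := PySem.Chars.join [' '] (tail.map PySem.Int.toChars)
        tokens ++ [('+' :: PySem.Int.toChars ((skip_s.length : Int) + 2))]
      else tokens)
    []

def serialize_with_skip_pointers_alt (postings_list : List Int) : String :=
  let tokens := swsTokens postings_list postings_list.length (Nat.sqrt postings_list.length)
  if tokens = [] then "" else String.ofList (' ' :: PySem.Chars.join [' '] tokens)

-- ===== PRECONDITION & SPEC =====
def Spec_serialize_with_skip_pointers (postings_list : List Int) (out : String) : Prop := out = serialize_with_skip_pointers_alt postings_list
instance (postings_list : List Int) (out : String) : Decidable (Spec_serialize_with_skip_pointers postings_list out) := by unfold Spec_serialize_with_skip_pointers; infer_instance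

-- ===== CLAIM (what is proved, stated in full; the proofs are below) =====
def Claim_equal_serialize_with_skip_pointers : Prop := ∀ (postings_list : List Int), Dom_serialize_with_skip_pointers postings_list → Spec_serialize_with_skip_pointers postings_list (serialize_with_skip_pointers postings_list)

-- ===== LEMMAS AND PROOFS =====

-- the tokens B's loop body appends at index i
def swsTok (pl : List Int) (length interval i : Nat) : List (List Char) :=
  [PySem.Int.toChars (pl.getD i 0)] ++
    (if 1 < interval ∧ i % interval = 0 ∧ i + interval < length then
      [('+' :: PySem.Int.toChars
        (((PySem.Chars.join [' ']
            ((PySem.List.slice pl (some ((i + 1 : Nat) : Int)) (some ((i + interval : Nat) : Int))).map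
              PySem.Int.toChars)).length : Int) + 2))]
    else [])

-- the final string (as chars): every token preceded by one space
def swsG (ts : List (List Char)) : List Char := (ts.map (fun t => ' ' :: t)).flatten

lemma swsG_append (a b : List (List Char)) : swsG (a ++ b) = swsG a ++ swsG b := by
  simp [swsG]

lemma swsTokens_eq_flatMap (pl : List Int) (length interval : Nat) :
    swsTokens pl length interval = (List.range length).flatMap (swsTok pl length interval) := by
  unfold swsTokens
  have key : ∀ (l : List Nat) (acc : List (List Char)),
      l.foldl
        (fun tokens i =>
          let tokens := tokens ++ [PySem.Int.toChars (pl.getD i 0)]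
          if 1 < interval ∧ i % interval = 0 ∧ i + interval < length then
            let tail := PySem.List.slice pl (some ((i + 1 : Nat) : Int)) (some ((i + interval : Nat) : Int))
            let skip_s := PySem.Chars.join [' '] (tail.map PySem.Int.toChars)
            tokens ++ [('+' :: PySem.Int.toChars ((skip_s.length : Int) + 2))]
          else tokens) acc
      = acc ++ l.flatMap (swsTok pl length interval) := by
    intro l
    induction l with
    | nil => intro acc; simp
    | cons i l ih =>
      intro acc
      simp only [List.foldl_cons, List.flatMap_cons, ih]
      by_cases h : 1 < interval ∧ i % interval = 0 ∧ i + interval < length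
      · simp [swsTok, h, List.append_assoc]
      · simp [swsTok, h, List.append_assoc]
  exact key (List.range length) []

-- " " + " ".join(ts) (ts nonempty) is exactly: each token preceded by one space
lemma join_space (ts : List (List Char)) (h : ts ≠ []) :
    ' ' :: PySem.Chars.join [' '] ts = swsG ts := by
  induction ts with
  | nil => exact absurd rfl h
  | cons a rest ih =>
    cases rest with
    | nil => simp [PySem.Chars.join_singleton, swsG]
    | cons b r =>
      rw [PySem.Chars.join_cons_cons]
      have := ih (by simp)
      simp only [swsG, List.map_cons, List.flatten_cons] at this ⊢
      simp [← this, List.append_assoc]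

lemma map_getD_range' (pl : List Int) :
    ∀ (k a : Nat), a + k ≤ pl.length →
      (List.range' a k).map (fun i => pl.getD i 0) = (pl.drop a).take k := by
  intro k
  induction k with
  | zero => intro a _; simp
  | succ k ih =>
    intro a h
    have ha : a < pl.length := by omega
    rw [List.range'_succ, List.map_cons, ih (a + 1) (by omega),
      List.drop_eq_getElem_cons ha, List.take_succ_cons, List.getD_eq_getElem pl 0 ha]

lemma interior_mod_ne (v c i : Nat) (_hv : 1 < v) (hc : c % v = 0)
    (h1 : c + 1 ≤ i) (h2 : i < c + v) : i % v ≠ 0 := by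
  obtain ⟨q, hq⟩ := Nat.dvd_of_mod_eq_zero hc
  have hi : i = v * q + (i - c) := by omega
  rw [hi, Nat.mul_add_mod_self_left, Nat.mod_eq_of_lt (by omega)]
  omega

-- the loop invariant: from counter c on, A appends exactly B's tokens, each preceded by a space
lemma swsLoopA_eq_aux (pl : List Int) (v : Nat) :
    ∀ (k c : Nat) (res : List Char), pl.length - c ≤ k →
      swsLoopA pl pl.length v c res =
        res ++ swsG ((List.range' c (pl.length - c)).flatMap (swsTok pl pl.length v)) := by
  intro k
  induction k with
  | zero =>
    intro c res hk
    rw [swsLoopA]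
    have h : ¬ c < pl.length := by omega
    have h0 : pl.length - c = 0 := by omega
    simp [h, h0, swsG]
  | succ k ih =>
    intro c res hk
    rw [swsLoopA]
    by_cases h : c < pl.length
    · simp only [h, dif_pos]
      have hsplit : pl.length - c = (pl.length - (c + 1)) + 1 := by omega
      by_cases hb : c % v ≠ 0 ∨ v ≤ 1
      · -- continue branch: no skip pointer at c
        rw [if_pos hb]
        rw [ih (c + 1) _ (by omega)]
        have htok : swsTok pl pl.length v c = [PySem.Int.toChars (pl.getD c 0)] := by
          unfold swsTok
          have : ¬ (1 < v ∧ c % v = 0 ∧ c + v < pl.length) := by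
            rcases hb with hb | hb
            · exact fun hcon => hb hcon.2.1
            · exact fun hcon => by omega
          simp [this]
        rw [hsplit, List.range'_succ, List.flatMap_cons, htok, swsG_append]
        simp [swsG, List.append_assoc]
      · -- c % v = 0 and 1 < v
        have hm : c % v = 0 := by by_contra hc; exact hb (Or.inl hc)
        have hv1 : 1 < v := by by_contra hc; exact hb (Or.inr (by omega))
        rw [if_neg hb]
        by_cases hbd : c + v < pl.length
        · -- skip-pointer branch
          simp only [hbd, if_pos]
          have hslice : PySem.List.slice pl (some ((c + 1 : Nat) : Int)) (some ((c + v : Nat) : Int))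
              = (pl.drop (c + 1)).take (v - 1) := by
            rw [PySem.List.slice_natCast]
            congr 1
            omega
          have hlen : (PySem.List.slice pl (some ((c + 1 : Nat) : Int)) (some ((c + v : Nat) : Int))).length
              = v - 1 := by
            rw [hslice]; simp; omega
          rw [hlen, ih (c + (v - 1) + 1) _ (by omega)]
          have hjump : c + (v - 1) + 1 = c + v := by omega
          rw [hjump]
          -- split the remaining index range into the current block and the rest
          have hrange : List.range' c (pl.length - c)
              = List.range' c v ++ List.range' (c + v) (pl.length - (c + v)) := by
            rw [List.range'_append_1]
            congr 1
            omega
          have hblock : List.range' c v = c :: List.range' (c + 1) (v - 1) := by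
            conv_lhs => rw [show v = (v - 1) + 1 by omega]
            rw [List.range'_succ]
          -- block interiors carry no skip pointer and are exactly the sliced documents
          have hinterior : (List.range' (c + 1) (v - 1)).flatMap (swsTok pl pl.length v)
              = ((pl.drop (c + 1)).take (v - 1)).map PySem.Int.toChars := by
            have hc : ∀ i ∈ List.range' (c + 1) (v - 1),
                swsTok pl pl.length v i = [PySem.Int.toChars (pl.getD i 0)] := by
              intro i hi
              rw [List.mem_range'_1] at hi
              unfold swsTok
              have : ¬ (1 < v ∧ i % v = 0 ∧ i + v < pl.length) := by
                intro hcon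
                exact interior_mod_ne v c i hv1 hm hi.1 (by omega) hcon.2.1
              simp [this]
            rw [List.flatMap_congr hc, ← List.map_eq_flatMap,
              ← map_getD_range' pl (v - 1) (c + 1) (by omega), List.map_map]
            rfl
          have htokc : swsTok pl pl.length v c
              = [PySem.Int.toChars (pl.getD c 0),
                 ('+' :: PySem.Int.toChars
                   (((PySem.Chars.join [' ']
                       ((PySem.List.slice pl (some ((c + 1 : Nat) : Int)) (some ((c + v : Nat) : Int))).map
                         PySem.Int.toChars)).length : Int) + 2))] := by
            unfold swsTok
            have : 1 < v ∧ c % v = 0 ∧ c + v < pl.length := ⟨hv1, hm, hbd⟩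
            simp [this]
          have hnonempty :
              ((PySem.List.slice pl (some ((c + 1 : Nat) : Int)) (some ((c + v : Nat) : Int))).map
                PySem.Int.toChars) ≠ [] := by
            have hl : ((PySem.List.slice pl (some ((c + 1 : Nat) : Int)) (some ((c + v : Nat) : Int))).map
                PySem.Int.toChars).length = v - 1 := by rw [List.length_map, hlen]
            intro hcon
            rw [hcon] at hl
            simp at hl
            omega
          rw [hrange, List.flatMap_append, hblock, List.flatMap_cons, htokc, hinterior,
            swsG_append, swsG_append, ← hslice, ← join_space _ hnonempty]
          simp [swsG, List.append_assoc]
        · -- boundary ≥ length: plain step, and no skip pointer at c either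
          simp only [hbd, if_neg, not_false_eq_true]
          rw [ih (c + 1) _ (by omega)]
          have htok : swsTok pl pl.length v c = [PySem.Int.toChars (pl.getD c 0)] := by
            unfold swsTok
            have : ¬ (1 < v ∧ c % v = 0 ∧ c + v < pl.length) := fun hcon => hbd hcon.2.2
            simp [this]
          rw [hsplit, List.range'_succ, List.flatMap_cons, htok, swsG_append]
          simp [swsG, List.append_assoc]
    · simp only [h, dif_neg, not_false_eq_true]
      have h0 : pl.length - c = 0 := by omega
      simp [h0, swsG]

lemma swsLoopA_eq (pl : List Int) (v : Nat) :
    swsLoopA pl pl.length v 0 [] =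
      swsG ((List.range pl.length).flatMap (swsTok pl pl.length v)) := by
  rw [swsLoopA_eq_aux pl v (pl.length) 0 [] (by omega)]
  simp [List.range_eq_range']

-- ===== VERDICT (by name: the statement is the Claim_ definition above) =====
theorem serialize_with_skip_pointers_spec : Claim_equal_serialize_with_skip_pointers := by
  intro pl _
  unfold Spec_serialize_with_skip_pointers serialize_with_skip_pointers serialize_with_skip_pointers_alt
  rw [swsLoopA_eq, ← swsTokens_eq_flatMap]
  by_cases h : swsTokens pl pl.length (Nat.sqrt pl.length) = []
  · simp [h, swsG]
  · simp only [h, if_neg, not_false_eq_true]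
    rw [← join_space _ h]
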